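-- pv_equiv track=rewrite | github.com/SSAFY-9-S4-STUDY/SWEAB | day32/P_87391/P_87391_seoJam.py | solution
-- ===== SOURCE A (Python) =====
-- def solution(n, m, x, y, queries):
--     q = len(queries)
--
--     row_start = row_end = x     # 위, 아래
--     col_left = col_right = y    # 좌, 우
--
--     for i in range(q-1, -1, -1):
--         command, dx = queries[i]
--
--         # 한주꺼 보고 조건문 바꿈... 한방에 해결
--         if col_right < col_left or row_end < row_start:
--             return 0
--
--         if command == 0:
--             # if col_left > 0 and col_left+dx > m-1:    # 후보군이 격자 밖으로 벗어난 경우(1)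
--             #     return 0
--             col_left = 0 if col_left == 0 else col_left + dx
--             col_right = min(m-1, col_right+dx)
--
--         elif command == 1:
--             # if col_right < m-1 and col_right-dx < 0:  # 후보군이 격자 밖으로 벗어난 경우(2)
--             #     return 0
--             col_left = max(col_left-dx, 0)
--             col_right = m-1 if col_right == m-1 else col_right - dx
--
--         elif command == 2:
--             # if row_start > 0 and row_start+dx > n-1:  # 후보군이 격자 밖으로 벗어난 경우(3)
--             #     return 0
--             row_start = 0 if row_start == 0 else row_start + dx
--             row_end = min(n-1, row_end+dx)
--
--         else:
--             # if row_end < n-1 and row_end-dx < 0:      # 후보군이 격자 밖으로 벗어난 경우(4)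
--             #     return 0
--             row_start = max(row_start-dx, 0)
--             row_end = n-1 if row_end == n-1 else row_end - dx
--
--     answer = (row_end-row_start+1) * (col_right-col_left+1)
--
--     return answer
-- ===== SOURCE B (Python) =====
-- def solution(n, m, x, y, queries):
--     # Undo the moves in reverse, tracking the column interval and the row
--     # interval in two separate passes.  Each pass flags the case where the
--     # candidate interval is already empty before undoing the next move.
--     rev = queries[::-1]
--
--     cl = cr = y
--     col_bad = False
--     for c, dx in rev:
--         if cr < cl:
--             col_bad = True
--         if c == 0:
--             cl = 0 if cl == 0 else cl + dx
--             cr = min(m - 1, cr + dx)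
--         elif c == 1:
--             cl = max(cl - dx, 0)
--             cr = m - 1 if cr == m - 1 else cr - dx
--
--     rs = re = x
--     row_bad = False
--     for c, dx in rev:
--         if re < rs:
--             row_bad = True
--         if c == 2:
--             rs = 0 if rs == 0 else rs + dx
--             re = min(n - 1, re + dx)
--         elif c not in (0, 1):
--             rs = max(rs - dx, 0)
--             re = n - 1 if re == n - 1 else re - dx
--
--     if col_bad or row_bad:
--         return 0
--     return (re - rs + 1) * (cr - cl + 1)
-- ===== Notes on version B (the rewrite author's own statement) =====
-- stated objective: alternative
-- what changed: Replaces A's single interleaved reverse loop with early return by two independent reverse passes (one tracking the column interval, one the row interval), each with a sticky empty-interval flag checked at the top of every iteration; the flags and final bounds are combined at the end.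
import Mathlib
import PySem

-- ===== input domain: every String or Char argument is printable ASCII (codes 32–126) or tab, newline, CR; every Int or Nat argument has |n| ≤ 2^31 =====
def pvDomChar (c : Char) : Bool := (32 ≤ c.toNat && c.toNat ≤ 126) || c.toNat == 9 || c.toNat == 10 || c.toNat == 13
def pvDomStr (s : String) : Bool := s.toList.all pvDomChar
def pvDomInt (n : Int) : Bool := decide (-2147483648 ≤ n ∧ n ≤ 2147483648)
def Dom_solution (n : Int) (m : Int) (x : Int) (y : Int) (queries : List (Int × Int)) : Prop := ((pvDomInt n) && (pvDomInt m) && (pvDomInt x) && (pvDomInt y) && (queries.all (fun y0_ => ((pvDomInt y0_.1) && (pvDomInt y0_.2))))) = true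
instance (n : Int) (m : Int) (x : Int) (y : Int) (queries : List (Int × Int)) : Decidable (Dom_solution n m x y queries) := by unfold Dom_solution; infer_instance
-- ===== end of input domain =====

-- B splits A's single interleaved reverse loop into two independent reverse passes
-- (columns and rows) with sticky empty-interval flags; objective: alternative decomposition.

-- ===== PORT A =====
-- A's reverse for-loop over indices q-1..0, transliterated as structural
-- recursion over queries.reverse with the same state and branch order.
def solLoopA (n : Int) (m : Int) : List (Int × Int) → Int → Int → Int → Int → Int
  | [], rs, re, cl, cr => (re - rs + 1) * (cr - cl + 1)
  | (c, dx) :: rest, rs, re, cl, cr =>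
    if cr < cl ∨ re < rs then 0
    else if c == 0 then
      solLoopA n m rest rs re (if cl == 0 then 0 else cl + dx) (min (m - 1) (cr + dx))
    else if c == 1 then
      solLoopA n m rest rs re (max (cl - dx) 0) (if cr == m - 1 then m - 1 else cr - dx)
    else if c == 2 then
      solLoopA n m rest (if rs == 0 then 0 else rs + dx) (min (n - 1) (re + dx)) cl cr
    else
      solLoopA n m rest (max (rs - dx) 0) (if re == n - 1 then n - 1 else re - dx) cl cr

def solution (n : Int) (m : Int) (x : Int) (y : Int) (queries : List (Int × Int)) : Int :=
  solLoopA n m queries.reverse x x y y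

-- ===== PORT B =====
-- column update of one query (B's first loop body)
def colStep (m : Int) (c : Int) (dx : Int) (cl : Int) (cr : Int) : Int × Int :=
  if c == 0 then ((if cl == 0 then 0 else cl + dx), min (m - 1) (cr + dx))
  else if c == 1 then (max (cl - dx) 0, (if cr == m - 1 then m - 1 else cr - dx))
  else (cl, cr)

-- row update of one query (B's second loop body)
def rowStep (n : Int) (c : Int) (dx : Int) (rs : Int) (re : Int) : Int × Int :=
  if c == 2 then ((if rs == 0 then 0 else rs + dx), min (n - 1) (re + dx))
  else if c == 0 ∨ c == 1 then (rs, re)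
  else (max (rs - dx) 0, (if re == n - 1 then n - 1 else re - dx))

-- B's column pass: flag an already-empty interval at the top of each iteration
def colLoop (m : Int) : List (Int × Int) → Int → Int → Bool → Int × Int × Bool
  | [], cl, cr, bad => (cl, cr, bad)
  | (c, dx) :: rest, cl, cr, bad =>
    let bad' := bad || decide (cr < cl)
    let s := colStep m c dx cl cr
    colLoop m rest s.1 s.2 bad'

-- B's row pass
def rowLoop (n : Int) : List (Int × Int) → Int → Int → Bool → Int × Int × Bool
  | [], rs, re, bad => (rs, re, bad)
  | (c, dx) :: rest, rs, re, bad =>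
    let bad' := bad || decide (re < rs)
    let s := rowStep n c dx rs re
    rowLoop n rest s.1 s.2 bad'

def solution_alt (n : Int) (m : Int) (x : Int) (y : Int) (queries : List (Int × Int)) : Int :=
  let rev := queries.reverse
  let col := colLoop m rev y y false
  let row := rowLoop n rev x x false
  if col.2.2 || row.2.2 then 0
  else (row.2.1 - row.1 + 1) * (col.2.1 - col.1 + 1)

-- ===== PRECONDITION & SPEC =====
def Spec_solution (n : Int) (m : Int) (x : Int) (y : Int) (queries : List (Int × Int)) (out : Int) : Prop := out = solution_alt n m x y queries
instance (n : Int) (m : Int) (x : Int) (y : Int) (queries : List (Int × Int)) (out : Int) : Decidable (Spec_solution n m x y queries out) := by unfold Spec_solution; infer_instance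

-- ===== CLAIM (what is proved, stated in full; the proofs are below) =====
def Claim_equal_solution : Prop := ∀ (n : Int) (m : Int) (x : Int) (y : Int) (queries : List (Int × Int)), Dom_solution n m x y queries → Spec_solution n m x y queries (solution n m x y queries)

-- ===== LEMMAS AND PROOFS =====

-- A's step rewritten through colStep/rowStep: exactly one of the two pairs changes.
lemma solLoopA_cons (n m c dx rs re cl cr : Int) (rest : List (Int × Int)) :
    solLoopA n m ((c, dx) :: rest) rs re cl cr =
      if cr < cl ∨ re < rs then 0
      else solLoopA n m rest (rowStep n c dx rs re).1 (rowStep n c dx rs re).2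
            (colStep m c dx cl cr).1 (colStep m c dx cl cr).2 := by
  simp only [solLoopA, colStep, rowStep]
  by_cases h0 : c = 0 <;> by_cases h1 : c = 1 <;> by_cases h2 : c = 2 <;>
    simp [h0, h1, h2]

-- the flags are sticky
lemma colLoop_bad_true (m : Int) (qs : List (Int × Int)) :
    ∀ cl cr, (colLoop m qs cl cr true).2.2 = true := by
  induction qs with
  | nil => intro cl cr; rfl
  | cons hd rest ih =>
    intro cl cr
    obtain ⟨c, dx⟩ := hd
    simp only [colLoop, Bool.true_or]
    exact ih _ _

lemma rowLoop_bad_true (n : Int) (qs : List (Int × Int)) :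
    ∀ rs re, (rowLoop n qs rs re true).2.2 = true := by
  induction qs with
  | nil => intro rs re; rfl
  | cons hd rest ih =>
    intro rs re
    obtain ⟨c, dx⟩ := hd
    simp only [rowLoop, Bool.true_or]
    exact ih _ _

-- main invariant: the interleaved loop equals the two-pass formulation
lemma main_inv (n m : Int) (qs : List (Int × Int)) :
    ∀ rs re cl cr,
      solLoopA n m qs rs re cl cr =
        (if (colLoop m qs cl cr false).2.2 || (rowLoop n qs rs re false).2.2 then 0
         else ((rowLoop n qs rs re false).2.1 - (rowLoop n qs rs re false).1 + 1) *
              ((colLoop m qs cl cr false).2.1 - (colLoop m qs cl cr false).1 + 1)) := by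
  induction qs with
  | nil =>
    intro rs re cl cr
    simp [solLoopA, colLoop, rowLoop]
  | cons hd rest ih =>
    intro rs re cl cr
    obtain ⟨c, dx⟩ := hd
    rw [solLoopA_cons]
    simp only [colLoop, rowLoop, Bool.false_or]
    by_cases hdeg : cr < cl ∨ re < rs
    · rw [if_pos hdeg]
      rcases hdeg with hc | hr
      · rw [show (decide (cr < cl)) = true by simpa using hc, colLoop_bad_true]
        simp
      · rw [show (decide (re < rs)) = true by simpa using hr, rowLoop_bad_true]
        simp
    · rw [if_neg hdeg]
      push_neg at hdeg
      rw [show (decide (cr < cl)) = false by simpa using hdeg.1,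
          show (decide (re < rs)) = false by simpa using hdeg.2]
      exact ih _ _ _ _

-- ===== VERDICT (by name: the statement is the Claim_ definition above) =====
theorem solution_spec : Claim_equal_solution := by
  intro n m x y queries _
  unfold Spec_solution solution solution_alt
  exact main_inv n m queries.reverse x x y y
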